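-- pv_equiv track=rewrite | github.com/Kim-Jin-Uk/Deep-Lunch-KJO | week2/3-1.py | neg_pos_separation_for
-- ===== SOURCE A (Python) =====
-- def neg_pos_separation_for(arr):
--     pos_arr = []
--     neg_arr = []
--     for value in arr:
--         if value > 0:
--             pos_arr.append(value)
--         else:
--             neg_arr.append(value)
--     return neg_arr + pos_arr
-- ===== SOURCE B (Python) =====
-- def neg_pos_separation_for(arr):
--     # stable sort on the boolean key: all v <= 0 (False) first, then v > 0 (True),
--     # each group in original order
--     return sorted(arr, key=lambda v: v > 0)
-- ===== Notes on version B (the rewrite author's own statement) =====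
-- stated objective: idiomatic
-- what changed: Replaces the explicit two-bucket accumulation loop with a single stable sort keyed on the sign predicate (sorted(arr, key=lambda v: v > 0)), which yields non-positives then positives each in original order.
import Mathlib
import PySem

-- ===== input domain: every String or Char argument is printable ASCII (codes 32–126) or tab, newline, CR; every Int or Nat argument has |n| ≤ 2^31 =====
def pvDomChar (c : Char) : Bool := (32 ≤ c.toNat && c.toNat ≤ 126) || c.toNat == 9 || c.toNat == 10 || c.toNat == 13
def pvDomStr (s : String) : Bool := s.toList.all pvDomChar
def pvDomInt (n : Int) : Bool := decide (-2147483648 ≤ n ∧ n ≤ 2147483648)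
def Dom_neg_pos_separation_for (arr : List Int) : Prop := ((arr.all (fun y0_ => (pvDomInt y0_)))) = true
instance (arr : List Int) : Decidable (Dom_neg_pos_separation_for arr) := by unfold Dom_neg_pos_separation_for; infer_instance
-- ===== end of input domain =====

-- B replaces A's explicit two-bucket loop by one stable sort keyed on the sign predicate (idiomatic; same result, proved equal).


-- ===== PORT A =====
-- literal port: one pass appending to pos_arr / neg_arr, then neg_arr + pos_arr
def neg_pos_separation_for (arr : List Int) : List Int :=
  let st := arr.foldl
    (fun (st : List Int × List Int) value =>
      if value > 0 then (st.1 ++ [value], st.2) else (st.1, st.2 ++ [value]))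
    ([], [])
  st.2 ++ st.1

-- ===== PORT B =====
-- sorted(arr, key=lambda v: v > 0): Python's bool key False < True is ported as the Int key 0 / 1 (exact)
def neg_pos_separation_for_alt (arr : List Int) : List Int :=
  PySem.List.sorted arr (fun v => if v > 0 then (1 : Int) else 0)

-- ===== PRECONDITION & SPEC =====
def Spec_neg_pos_separation_for (arr : List Int) (out : List Int) : Prop := out = neg_pos_separation_for_alt arr
instance (arr : List Int) (out : List Int) : Decidable (Spec_neg_pos_separation_for arr out) := by unfold Spec_neg_pos_separation_for; infer_instance

-- ===== CLAIM (what is proved, stated in full; the proofs are below) =====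
def Claim_equal_neg_pos_separation_for : Prop := ∀ (arr : List Int), Dom_neg_pos_separation_for arr → Spec_neg_pos_separation_for arr (neg_pos_separation_for arr)

-- ===== LEMMAS AND PROOFS =====

-- insertBy puts x after a prefix it is not before and before a suffix it is before
theorem pv_insertBy_split (before : Int → Int → Bool) (x : Int) (L0 L1 : List Int)
    (h0 : ∀ y ∈ L0, before x y = false) (h1 : ∀ y ∈ L1, before x y = true) :
    PySem.List.insertBy before x (L0 ++ L1) = L0 ++ x :: L1 := by
  induction L0 with
  | nil =>
    cases L1 with
    | nil => simp [PySem.List.insertBy]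
    | cons y ys =>
      have := h1 y (by simp)
      simp [PySem.List.insertBy, this]
  | cons y ys ih =>
    have hy := h0 y (by simp)
    simp only [List.cons_append, PySem.List.insertBy, hy]
    simp only [Bool.false_eq_true, if_false]
    exact congrArg (y :: ·) (ih (fun z hz => h0 z (by simp [hz])))

-- loop invariant for B's insertion sort
theorem pv_sortB (arr : List Int) : ∀ (L0 L1 : List Int),
    (∀ y ∈ L0, ¬ (0 : Int) < y) → (∀ y ∈ L1, (0 : Int) < y) →
    arr.foldl (fun acc x => PySem.List.insertBy (fun a b => decide ((if a > 0 then (1:Int) else 0) < (if b > 0 then (1:Int) else 0))) x acc) (L0 ++ L1)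
      = (L0 ++ arr.filter (fun v => !(decide ((0 : Int) < v)))) ++ (L1 ++ arr.filter (fun v => decide ((0 : Int) < v))) := by
  induction arr with
  | nil => intro L0 L1 _ _; simp
  | cons x xs ih =>
    intro L0 L1 h0 h1
    by_cases hx : (0 : Int) < x
    · -- x positive: key 1, never before anything → appended at the end
      have hins : PySem.List.insertBy (fun a b => decide ((if a > 0 then (1:Int) else 0) < (if b > 0 then (1:Int) else 0))) x (L0 ++ L1)
          = (L0 ++ L1) ++ [x] := by
        apply PySem.List.insertBy_of_forall_not_before
        intro y hy
        rcases List.mem_append.mp hy with h | h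
        · have := h0 y h; simp [hx, this]
        · have := h1 y h; simp [hx, this]
      simp only [List.foldl_cons, hins, List.append_assoc]
      have := ih L0 (L1 ++ [x]) h0 (by intro y hy; rcases List.mem_append.mp hy with h | h
                                       · exact h1 y h
                                       · simp at h; simpa [h] using hx)
      simp only [List.append_assoc] at this ⊢
      rw [this]
      simp [List.filter, hx]
    · -- x non-positive: key 0, before exactly the positives → inserted between L0 and L1
      have hins : PySem.List.insertBy (fun a b => decide ((if a > 0 then (1:Int) else 0) < (if b > 0 then (1:Int) else 0))) x (L0 ++ L1)
          = (L0 ++ [x]) ++ L1 := by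
        have := pv_insertBy_split (fun a b => decide ((if a > 0 then (1:Int) else 0) < (if b > 0 then (1:Int) else 0))) x L0 L1
          (by intro y hy; have := h0 y hy; simp [hx, this])
          (by intro y hy; have := h1 y hy; simp [hx, this])
        simpa using this
      simp only [List.foldl_cons, hins]
      have := ih (L0 ++ [x]) L1 (by intro y hy; rcases List.mem_append.mp hy with h | h
                                    · exact h0 y h
                                    · simp at h; simpa [h] using hx) h1
      rw [this]
      simp [List.filter, hx]

-- loop invariant for A's two buckets
theorem pv_loopA (arr : List Int) : ∀ (pos neg : List Int),
    arr.foldl (fun (st : List Int × List Int) value =>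
        if value > 0 then (st.1 ++ [value], st.2) else (st.1, st.2 ++ [value])) (pos, neg)
      = (pos ++ arr.filter (fun v => decide ((0 : Int) < v)),
         neg ++ arr.filter (fun v => !(decide ((0 : Int) < v)))) := by
  induction arr with
  | nil => intro pos neg; simp
  | cons x xs ih =>
    intro pos neg
    by_cases hx : (0 : Int) < x
    · simp only [List.foldl_cons, hx]
      rw [ih]
      simp [List.filter, hx]
    · simp only [List.foldl_cons, if_neg (show ¬ x > 0 from hx)]
      rw [ih]
      simp [List.filter, hx]

-- ===== VERDICT (by name: the statement is the Claim_ definition above) =====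
theorem neg_pos_separation_for_spec : Claim_equal_neg_pos_separation_for := by
  intro arr _
  unfold Spec_neg_pos_separation_for neg_pos_separation_for neg_pos_separation_for_alt
  rw [PySem.List.sorted_eq_foldl_insertBy]
  have hB := pv_sortB arr [] [] (by simp) (by simp)
  have hA := pv_loopA arr [] []
  simp only [List.nil_append] at hB hA
  show (arr.foldl _ ([], [])).2 ++ (arr.foldl _ ([], [])).1 = _
  rw [hB, hA]
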